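-- pv_equiv track=rewrite | github.com/pypi-data/pypi-mirror-83 | packages/tinycat/tinycat-0.1.1.tar.gz/tinycat-0.1.1/tinycat/translate.py | paragraph_parser
-- ===== SOURCE A (Python) =====
-- from typing import List, Callable, Dict
--
-- def paragraph_parser(source: str) -> List[str]:
--     current_paragraph: str = ""
--     paragraph_list: List[str] = []
--     for line in source.split("\n"):
--         if line.strip():
--             current_paragraph += line + "\n"
--         elif current_paragraph:
--             paragraph_list.append(current_paragraph.strip())
--             current_paragraph = ""
--     if current_paragraph:
--         paragraph_list.append(current_paragraph.strip())
--     return paragraph_list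
-- ===== SOURCE B (Python) =====
-- def paragraph_parser(source: str):
--     lines = source.split("\n")
--     n = len(lines)
--     paragraphs = []
--     i = 0
--     while i < n:
--         if not lines[i].strip():
--             i += 1
--         else:
--             j = i + 1
--             while j < n and lines[j].strip():
--                 j += 1
--             paragraphs.append("\n".join(lines[i:j]).strip())
--             i = j
--     return paragraphs
-- ===== Notes on version B (the rewrite author's own statement) =====
-- stated objective: alternative
-- what changed: B scans the line list with two pointers, extracting each maximal run of non-blank lines and joining its lines with a newline separator directly, instead of A's running string accumulator flushed on every blank line.
import Mathlib
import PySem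

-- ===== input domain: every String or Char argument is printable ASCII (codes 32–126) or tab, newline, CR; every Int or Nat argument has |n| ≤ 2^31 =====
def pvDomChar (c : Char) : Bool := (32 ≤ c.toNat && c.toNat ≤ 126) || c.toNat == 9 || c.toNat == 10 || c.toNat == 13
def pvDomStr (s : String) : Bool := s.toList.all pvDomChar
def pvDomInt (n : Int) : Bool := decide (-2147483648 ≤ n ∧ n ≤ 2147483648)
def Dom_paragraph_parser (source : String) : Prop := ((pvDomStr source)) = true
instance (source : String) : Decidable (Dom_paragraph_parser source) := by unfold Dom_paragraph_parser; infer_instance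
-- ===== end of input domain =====

-- B replaces A's running string accumulator (flushed on blank lines) by a two-pointer scan
-- over the line list that joins each maximal non-blank run directly; same cost, different structure.

-- ===== PORT A =====
-- one iteration of A's for-loop: state = (current_paragraph, paragraph_list)
def pvAStep (st : List Char × List (List Char)) (line : List Char) :
    List Char × List (List Char) :=
  if PySem.Chars.strip line ≠ [] then (st.1 ++ line ++ ['\n'], st.2)
  else if st.1 ≠ [] then ([], st.2 ++ [PySem.Chars.strip st.1])
  else st

def paragraph_parser (source : String) : List String :=
  (if ((PySem.Chars.splitOn source.toList ['\n']).foldl pvAStep ([], [])).1 ≠ [] then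
      ((PySem.Chars.splitOn source.toList ['\n']).foldl pvAStep ([], [])).2
        ++ [PySem.Chars.strip ((PySem.Chars.splitOn source.toList ['\n']).foldl pvAStep ([], [])).1]
    else ((PySem.Chars.splitOn source.toList ['\n']).foldl pvAStep ([], [])).2).map String.ofList

-- ===== PORT B =====
-- outer while loop of Source B: skip a blank line, or take the maximal non-blank run
-- (inner while loop = takeWhile/dropWhile), join it with the newline separator, strip, continue after it
def pvRunScan (lines : List (List Char)) : List (List Char) :=
  match lines with
  | [] => []
  | l :: rest =>
    if PySem.Chars.strip l = [] then pvRunScan rest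
    else
      PySem.Chars.strip (PySem.Chars.join ['\n']
          (l :: rest.takeWhile (fun x => !(PySem.Chars.strip x).isEmpty)))
        :: pvRunScan (rest.dropWhile (fun x => !(PySem.Chars.strip x).isEmpty))
termination_by lines.length
decreasing_by
  · simp
  · exact Nat.lt_succ_of_le (List.length_dropWhile_le _ _)

def paragraph_parser_alt (source : String) : List String :=
  (pvRunScan (PySem.Chars.splitOn source.toList ['\n'])).map String.ofList

-- ===== PRECONDITION & SPEC =====
def Spec_paragraph_parser (source : String) (out : List String) : Prop := out = paragraph_parser_alt source
instance (source : String) (out : List String) : Decidable (Spec_paragraph_parser source out) := by unfold Spec_paragraph_parser; infer_instance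

-- ===== CLAIM (what is proved, stated in full; the proofs are below) =====
def Claim_equal_paragraph_parser : Prop := ∀ (source : String), Dom_paragraph_parser source → Spec_paragraph_parser source (paragraph_parser source)

-- ===== LEMMAS AND PROOFS =====

-- A's loop restructured as a recursion over the remaining lines (proof-only helper)
def pvCont (cur : List Char) (lines : List (List Char)) : List (List Char) :=
  match lines with
  | [] => if cur ≠ [] then [PySem.Chars.strip cur] else []
  | l :: rest =>
    if PySem.Chars.strip l ≠ [] then pvCont (cur ++ l ++ ['\n']) rest
    else if cur ≠ [] then PySem.Chars.strip cur :: pvCont [] rest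
    else pvCont [] rest

-- the lines of a run, each with its trailing '\n'
def pvJ (run : List (List Char)) : List Char := (run.map (· ++ ['\n'])).flatten

theorem pvRunScan_nil : pvRunScan [] = [] := by
  rw [pvRunScan.eq_def]

theorem pvRunScan_cons (l : List Char) (rest : List (List Char)) :
    pvRunScan (l :: rest)
      = if PySem.Chars.strip l = [] then pvRunScan rest
        else
          PySem.Chars.strip (PySem.Chars.join ['\n']
              (l :: rest.takeWhile (fun x => !(PySem.Chars.strip x).isEmpty)))
            :: pvRunScan (rest.dropWhile (fun x => !(PySem.Chars.strip x).isEmpty)) := by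
  rw [pvRunScan.eq_def]

theorem pvFold_eq_cont (lines : List (List Char)) :
    ∀ (cur : List Char) (acc : List (List Char)),
    (if (lines.foldl pvAStep (cur, acc)).1 ≠ [] then
        (lines.foldl pvAStep (cur, acc)).2 ++ [PySem.Chars.strip (lines.foldl pvAStep (cur, acc)).1]
      else (lines.foldl pvAStep (cur, acc)).2)
      = acc ++ pvCont cur lines := by
  induction lines with
  | nil =>
    intro cur acc
    rw [pvCont]
    simp only [List.foldl_nil]
    split_ifs <;> simp
  | cons l rest ih =>
    intro cur acc
    rw [pvCont]
    simp only [List.foldl_cons, pvAStep]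
    by_cases h1 : PySem.Chars.strip l ≠ []
    · rw [if_pos h1, if_pos h1]
      exact ih _ _
    · rw [if_neg h1, if_neg h1]
      by_cases h2 : cur ≠ []
      · rw [if_pos h2, if_pos h2, ih [] (acc ++ [PySem.Chars.strip cur])]
        simp
      · have hc : cur = [] := by simpa using h2
        subst hc
        rw [if_neg h2, if_neg h2]
        exact ih _ _

theorem pvRstrip_app_nl (xs : List Char) :
    PySem.Chars.rstrip (xs ++ ['\n']) = PySem.Chars.rstrip xs := by
  simp only [PySem.Chars.rstrip, List.reverse_append, List.reverse_cons, List.reverse_nil,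
    List.nil_append, List.cons_append]
  rw [List.dropWhile_cons_of_pos (by decide)]

theorem pvStrip_app_nl (xs : List Char) :
    PySem.Chars.strip (xs ++ ['\n']) = PySem.Chars.strip xs := by
  simp only [PySem.Chars.strip, PySem.Chars.lstrip, List.dropWhile_append]
  split_ifs with h
  · have h' : List.dropWhile PySem.Chars.isspace xs = [] := by simpa using h
    rw [h', show List.dropWhile PySem.Chars.isspace ['\n'] = [] from by decide]
  · exact pvRstrip_app_nl _

theorem pvJoin_app_nl (tw : List (List Char)) :
    ∀ (l : List Char),
    PySem.Chars.join ['\n'] (l :: tw) ++ ['\n'] = l ++ ['\n'] ++ pvJ tw := by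
  induction tw with
  | nil => intro l; simp [PySem.Chars.join, pvJ, List.intercalate]
  | cons m tw ih =>
    intro l
    have hstep : PySem.Chars.join ['\n'] (l :: m :: tw)
        = l ++ ['\n'] ++ PySem.Chars.join ['\n'] (m :: tw) := by
      simp [PySem.Chars.join, List.intercalate]
    rw [hstep, pvJ]
    simp only [List.map_cons, List.flatten_cons]
    have h2 := ih m
    simp only [pvJ] at h2
    simp only [List.append_assoc] at h2 ⊢
    rw [h2]

-- combined invariant: P lines (empty accumulator) and Q lines (accumulator ends in '\n')
theorem pvPQ : ∀ (n : ℕ) (lines : List (List Char)), lines.length ≤ n →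
    (pvCont [] lines = pvRunScan lines) ∧
    (∀ pre : List Char,
      pvCont (pre ++ ['\n']) lines
        = PySem.Chars.strip (pre ++ ['\n']
              ++ pvJ (lines.takeWhile (fun x => !(PySem.Chars.strip x).isEmpty)))
          :: pvRunScan (lines.dropWhile (fun x => !(PySem.Chars.strip x).isEmpty))) := by
  intro n
  induction n with
  | zero =>
    intro lines h
    have hnil : lines = [] := List.length_eq_zero_iff.mp (Nat.le_zero.mp h)
    subst hnil
    refine ⟨by rw [pvCont, pvRunScan_nil]; simp, ?_⟩
    intro pre
    rw [pvCont]
    simp [pvJ, pvRunScan_nil]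
  | succ n ih =>
    intro lines h
    match lines with
    | [] =>
      refine ⟨by rw [pvCont, pvRunScan_nil]; simp, ?_⟩
      intro pre
      rw [pvCont]
      simp [pvJ, pvRunScan_nil]
    | l :: rest =>
      have hr : rest.length ≤ n := Nat.lt_succ_iff.mp (by simpa using h)
      have ihP := (ih rest hr).1
      have ihQ := (ih rest hr).2
      by_cases hb : PySem.Chars.strip l = []
      · have hb' : ¬ PySem.Chars.strip l ≠ [] := by simpa using hb
        have htw0 : (l :: rest).takeWhile (fun x => !(PySem.Chars.strip x).isEmpty) = [] := by
          simp [hb]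
        have hdw0 : (l :: rest).dropWhile (fun x => !(PySem.Chars.strip x).isEmpty)
            = l :: rest := by
          simp [hb]
        constructor
        · -- P, blank first line: both skip
          rw [pvCont, if_neg hb', if_neg (by simp : ¬(([] : List Char) ≠ []))]
          rw [pvRunScan_cons, if_pos hb]
          exact ihP
        · -- Q, blank first line: A flushes, B's run ends here
          intro pre
          rw [pvCont, if_neg hb', if_pos (by simp : pre ++ ['\n'] ≠ [])]
          rw [ihP, htw0, hdw0, pvRunScan_cons, if_pos hb]
          simp [pvJ]
      · have hb' : PySem.Chars.strip l ≠ [] := hb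
        have htw : (l :: rest).takeWhile (fun x => !(PySem.Chars.strip x).isEmpty)
            = l :: rest.takeWhile (fun x => !(PySem.Chars.strip x).isEmpty) := by
          simp [hb]
        have hdw : (l :: rest).dropWhile (fun x => !(PySem.Chars.strip x).isEmpty)
            = rest.dropWhile (fun x => !(PySem.Chars.strip x).isEmpty) := by
          simp [hb]
        constructor
        · -- P, non-blank first line: a new run starts
          rw [pvCont, if_pos hb']
          have e1 : ([] : List Char) ++ l ++ ['\n'] = l ++ ['\n'] := by simp
          rw [e1, ihQ l, pvRunScan_cons, if_neg hb]
          congr 1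
          rw [← pvJoin_app_nl, pvStrip_app_nl]
        · -- Q, non-blank first line: the pending paragraph grows
          intro pre
          rw [pvCont, if_pos hb']
          rw [ihQ (pre ++ ['\n'] ++ l), htw, hdw]
          congr 2
          simp [pvJ, List.append_assoc]

theorem pvCont_eq_runScan (lines : List (List Char)) :
    pvCont [] lines = pvRunScan lines :=
  (pvPQ lines.length lines le_rfl).1

-- ===== VERDICT (by name: the statement is the Claim_ definition above) =====
theorem paragraph_parser_spec : Claim_equal_paragraph_parser := by
  intro source _
  show paragraph_parser source = paragraph_parser_alt source
  unfold paragraph_parser paragraph_parser_alt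
  rw [pvFold_eq_cont _ [] [], List.nil_append, pvCont_eq_runScan]
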